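-- pv_equiv track=rewrite | github.com/miliar/Code_Jam_Webscraper | Solutions_python/Problem_34/258.py | parse
-- ===== SOURCE A (Python) =====
-- def parse(line):
--     new_line = ""
--     in_parenthesis = False
--     for c in line:
--         if c == "(":
--             new_line += c
--             in_parenthesis = True
--         elif c == ")":
--             new_line += c
--             in_parenthesis = False
--         else:
--             if in_parenthesis:
--                 new_line += c
--             else:
--                 new_line += "("+c+")"
--     line = new_line
--     lista = line.replace("(","|").replace(")","|").split("|")
--     lista2 = []
--     for x in lista:
--         if x != '':
--             lista2.append(x)
--     return lista2
-- ===== SOURCE B (Python) =====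
-- def parse(line):
--     # Single-pass tokenizer. The delimiters are '(', ')' and '|': each one ends
--     # the current token; parentheses also switch between grouped mode (a run of
--     # ordinary characters is one token) and free mode (each ordinary character
--     # is its own token).
--     tokens = []
--     cur = ""
--     grouped = False
--     for c in line:
--         if c in "()|":
--             if cur:
--                 tokens.append(cur)
--             cur = ""
--             if c != "|":
--                 grouped = c == "("
--         elif grouped:
--             cur += c
--         else:
--             tokens.append(c)
--     if cur:
--         tokens.append(cur)
--     return tokens
-- ===== Notes on version B (the rewrite author's own statement) =====
-- stated objective: faster
-- what changed: Replaced A's pipeline (build a parenthesis-wrapped intermediate string char by char, then two replace passes, a split and a filter pass) with a single-pass tokenizer over the delimiter set '(' ')' '|' that keeps a mode flag and a current-token buffer and emits the token list directly, with no intermediate string.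
import Mathlib
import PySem

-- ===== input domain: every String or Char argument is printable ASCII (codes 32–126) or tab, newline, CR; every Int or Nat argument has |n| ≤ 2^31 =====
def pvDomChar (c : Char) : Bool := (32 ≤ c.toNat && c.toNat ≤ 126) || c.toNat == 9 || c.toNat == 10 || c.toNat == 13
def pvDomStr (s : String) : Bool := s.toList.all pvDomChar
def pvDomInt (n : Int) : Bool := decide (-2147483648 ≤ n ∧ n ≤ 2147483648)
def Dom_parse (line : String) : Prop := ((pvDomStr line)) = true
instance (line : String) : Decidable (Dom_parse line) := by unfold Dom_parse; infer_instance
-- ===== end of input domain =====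

-- B replaces A's build-wrapped-string-then-replace/split/filter pipeline by a single-pass
-- tokenizer over the delimiter set '(' ')' '|' that emits the token list directly.

-- ===== PORT A =====
-- the for-loop building new_line (state: in_parenthesis, accumulated new_line)
def parseGo : List Char → Bool → List Char → List Char
  | [], _, nl => nl
  | c :: cs, p, nl =>
    if c = '(' then parseGo cs true (nl ++ [c])
    else if c = ')' then parseGo cs false (nl ++ [c])
    else if p then parseGo cs p (nl ++ [c])
    else parseGo cs p (nl ++ ['('] ++ [c] ++ [')'])

def parse (line : String) : List String :=
  ((PySem.Chars.splitOn
      (PySem.Chars.replace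
        (PySem.Chars.replace (parseGo line.toList false []) ['('] ['|']) [')'] ['|']) ['|']).foldl
    (fun acc x => if x ≠ [] then acc ++ [x] else acc) []).map String.ofList

-- ===== PORT B =====
-- the for loop of Source B (state: grouped flag, current token cur, result list acc)
def parseAltGo : List Char → Bool → List Char → List (List Char) → List (List Char)
  | [], _, cur, acc => if cur ≠ [] then acc ++ [cur] else acc
  | c :: cs, grouped, cur, acc =>
    if c = '(' ∨ c = ')' ∨ c = '|' then
      parseAltGo cs (if c = '|' then grouped else decide (c = '(')) []
        (if cur ≠ [] then acc ++ [cur] else acc)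
    else if grouped then parseAltGo cs grouped (cur ++ [c]) acc
    else parseAltGo cs grouped cur (acc ++ [[c]])

def parse_alt (line : String) : List String :=
  (parseAltGo line.toList false [] []).map String.ofList

-- ===== PRECONDITION & SPEC =====
def Spec_parse (line : String) (out : List String) : Prop := out = parse_alt line
instance (line : String) (out : List String) : Decidable (Spec_parse line out) := by unfold Spec_parse; infer_instance

-- ===== CLAIM (what is proved, stated in full; the proofs are below) =====
def Claim_equal_parse : Prop := ∀ (line : String), Dom_parse line → Spec_parse line (parse line)

-- ===== LEMMAS AND PROOFS =====

-- substitution performed by the two replace calls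
def pvSub (c : Char) : Char := if c = '(' then '|' else if c = ')' then '|' else c

-- accumulator-free version of A's string-building loop
def pvBuild : List Char → Bool → List Char
  | [], _ => []
  | c :: cs, p =>
    if c = '(' then '(' :: pvBuild cs true
    else if c = ')' then ')' :: pvBuild cs false
    else if p then c :: pvBuild cs p
    else '(' :: c :: ')' :: pvBuild cs p

-- split on '|' with a pending token prefix
def pvSplitAux : List Char → List Char → List (List Char)
  | [], cur => [cur]
  | c :: t, cur => if c = '|' then cur :: pvSplitAux t [] else pvSplitAux t (cur ++ [c])

-- reference state machine both ports are reduced to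
def pvSm : List Char → Bool → List Char → List (List Char)
  | [], _, cur => if cur ≠ [] then [cur] else []
  | c :: cs, p, cur =>
    if c = '(' then (if cur ≠ [] then [cur] else []) ++ pvSm cs true []
    else if c = ')' then (if cur ≠ [] then [cur] else []) ++ pvSm cs false []
    else if c = '|' then (if cur ≠ [] then [cur] else []) ++ pvSm cs p []
    else if p then pvSm cs p (cur ++ [c])
    else [c] :: pvSm cs p cur

theorem parseGo_eq_build (cs : List Char) : ∀ (p : Bool) (nl : List Char),
    parseGo cs p nl = nl ++ pvBuild cs p := by
  induction cs with
  | nil => intro p nl; simp [parseGo, pvBuild]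
  | cons c cs ih =>
    intro p nl
    by_cases h1 : c = '('
    · simp [parseGo, pvBuild, h1, ih]
    · by_cases h2 : c = ')'
      · simp [parseGo, pvBuild, h2, ih]
      · by_cases hp : p
        · simp [parseGo, pvBuild, h1, h2, hp, ih]
        · simp [parseGo, pvBuild, h1, h2, hp, ih]

theorem replace_single (c d : Char) (s : List Char) :
    PySem.Chars.replace s [c] [d] = s.map (fun x => if x = c then d else x) := by
  have go : ∀ (fuel : Nat) (s acc : List Char), s.length ≤ fuel →
      PySem.Chars.replace.go [c] [d] fuel s acc =
        acc.reverse ++ s.map (fun x => if x = c then d else x) := by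
    intro fuel
    induction fuel with
    | zero =>
      intro s acc h
      have : s = [] := by cases s <;> simp_all
      subst this; simp [PySem.Chars.replace.go]
    | succ f ihf =>
      intro s acc h
      cases s with
      | nil => simp [PySem.Chars.replace.go]
      | cons a t =>
        simp only [PySem.Chars.replace.go]
        by_cases hac : a = c
        · subst hac
          have hpre : List.isPrefixOf [a] (a :: t) = true := by simp [List.isPrefixOf]
          rw [if_pos hpre, ihf _ _ (by simpa using Nat.le_of_succ_le_succ h)]
          simp
        · have hpre : List.isPrefixOf [c] (a :: t) = false := by
            simp [List.isPrefixOf]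
            exact fun h' => absurd h'.symm hac
          rw [if_neg (by simp [hpre]), ihf _ _ (by simpa using Nat.le_of_succ_le_succ h)]
          simp [hac]
  simp only [PySem.Chars.replace, List.isEmpty]
  rw [go s.length s [] le_rfl]
  simp

theorem splitOn_bar (s : List Char) :
    PySem.Chars.splitOn s ['|'] = pvSplitAux s [] := by
  have go : ∀ (fuel : Nat) (s cur : List Char) (acc : List (List Char)), s.length ≤ fuel →
      PySem.Chars.splitOn.go ['|'] fuel s cur acc =
        acc.reverse ++ pvSplitAux s cur.reverse := by
    intro fuel
    induction fuel with
    | zero =>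
      intro s cur acc h
      have : s = [] := by cases s <;> simp_all
      subst this; simp [PySem.Chars.splitOn.go, pvSplitAux]
    | succ f ihf =>
      intro s cur acc h
      cases s with
      | nil => simp [PySem.Chars.splitOn.go, pvSplitAux]
      | cons a t =>
        simp only [PySem.Chars.splitOn.go]
        by_cases hab : a = '|'
        · subst hab
          have hpre : List.isPrefixOf ['|'] ('|' :: t) = true := by simp [List.isPrefixOf]
          rw [if_pos hpre, ihf _ _ _ (by simpa using Nat.le_of_succ_le_succ h)]
          simp [pvSplitAux]
        · have hpre : List.isPrefixOf ['|'] (a :: t) = false := by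
            simp [List.isPrefixOf]
            exact fun h' => hab h'.symm
          rw [if_neg (by simp [hpre]), ihf _ _ _ (by simpa using Nat.le_of_succ_le_succ h)]
          simp [pvSplitAux, hab]
  simp only [PySem.Chars.splitOn]
  rw [go (s.length + 1) s [] [] (by omega)]
  simp

-- filtering the split of A's wrapped-and-substituted string is the reference state machine
theorem split_build_eq_sm (cs : List Char) : ∀ (p : Bool) (cur : List Char),
    (p = false → cur = []) →
    (pvSplitAux ((pvBuild cs p).map pvSub) cur).filter (fun x => !x.isEmpty) = pvSm cs p cur := by
  induction cs with
  | nil =>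
    intro p cur _
    by_cases hc : cur = [] <;> simp [pvBuild, pvSplitAux, pvSm, hc]
  | cons c cs ih =>
    intro p cur hinv
    by_cases h1 : c = '('
    · subst h1
      have hb : pvBuild ('(' :: cs) p = '(' :: pvBuild cs true := by simp [pvBuild]
      rw [hb, List.map_cons, show pvSub '(' = '|' from rfl,
        show ∀ t, pvSplitAux ('|' :: t) cur = cur :: pvSplitAux t [] from fun t => by
          simp [pvSplitAux],
        List.filter_cons, ih true [] (by simp)]
      by_cases hc : cur = [] <;> simp [pvSm, hc]
    · by_cases h2 : c = ')'
      · subst h2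
        have hb : pvBuild (')' :: cs) p = ')' :: pvBuild cs false := by simp [pvBuild]
        rw [hb, List.map_cons, show pvSub ')' = '|' from rfl,
          show ∀ t, pvSplitAux ('|' :: t) cur = cur :: pvSplitAux t [] from fun t => by
            simp [pvSplitAux],
          List.filter_cons, ih false [] (by simp)]
        by_cases hc : cur = [] <;> simp [pvSm, h1, hc]
      · by_cases hp : p
        · -- inside parentheses: the char is copied verbatim
          have hb : pvBuild (c :: cs) p = c :: pvBuild cs p := by simp [pvBuild, h1, h2, hp]
          by_cases h3 : c = '|'
          · subst h3
            rw [hb, List.map_cons, show pvSub '|' = '|' from rfl,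
              show ∀ t, pvSplitAux ('|' :: t) cur = cur :: pvSplitAux t [] from fun t => by
                simp [pvSplitAux],
              List.filter_cons, ih p [] (by simp [hp])]
            by_cases hc : cur = [] <;> simp [pvSm, h1, h2, hc]
          · have hs : pvSub c = c := by simp [pvSub, h1, h2]
            rw [hb, List.map_cons, hs,
              show ∀ t, pvSplitAux (c :: t) cur = pvSplitAux t (cur ++ [c]) from fun t => by
                simp [pvSplitAux, h3],
              ih p (cur ++ [c]) (by simp [hp])]
            simp [pvSm, h1, h2, h3, hp]
        · -- outside parentheses: the char is wrapped as (c)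
          have hc : cur = [] := hinv (by simpa using hp)
          subst hc
          have hb : pvBuild (c :: cs) p = '(' :: c :: ')' :: pvBuild cs p := by
            simp [pvBuild, h1, h2, hp]
          by_cases h3 : c = '|'
          · subst h3
            rw [hb]
            simp only [List.map_cons, show pvSub '(' = '|' from rfl,
              show pvSub ')' = '|' from rfl, show pvSub '|' = '|' from rfl]
            rw [show ∀ t, pvSplitAux ('|' :: t) ([] : List Char) = [] :: pvSplitAux t [] from
                fun t => by simp [pvSplitAux]]
            rw [show ∀ t, pvSplitAux ('|' :: t) ([] : List Char) = [] :: pvSplitAux t [] from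
                fun t => by simp [pvSplitAux]]
            rw [show ∀ t, pvSplitAux ('|' :: t) ([] : List Char) = [] :: pvSplitAux t [] from
                fun t => by simp [pvSplitAux]]
            simp only [List.filter_cons]
            rw [ih p [] (fun _ => rfl)]
            simp [pvSm, h1, h2, hp]
          · have hs : pvSub c = c := by simp [pvSub, h1, h2]
            rw [hb]
            simp only [List.map_cons, show pvSub '(' = '|' from rfl,
              show pvSub ')' = '|' from rfl, hs]
            rw [show ∀ t, pvSplitAux ('|' :: t) ([] : List Char) = [] :: pvSplitAux t [] from
                fun t => by simp [pvSplitAux]]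
            rw [show ∀ t, pvSplitAux (c :: t) ([] : List Char) = pvSplitAux t [c] from
                fun t => by simp [pvSplitAux, h3]]
            rw [show ∀ t, pvSplitAux ('|' :: t) [c] = [c] :: pvSplitAux t [] from
                fun t => by simp [pvSplitAux]]
            simp only [List.filter_cons]
            rw [ih p [] (fun _ => rfl)]
            simp [pvSm, h1, h2, h3, hp]

-- B's loop with its two accumulators is the reference state machine
theorem parseAltGo_eq_sm (cs : List Char) : ∀ (p : Bool) (cur : List Char)
    (acc : List (List Char)), parseAltGo cs p cur acc = acc ++ pvSm cs p cur := by
  induction cs with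
  | nil =>
    intro p cur acc
    by_cases hc : cur = [] <;> simp [parseAltGo, pvSm, hc]
  | cons c cs ih =>
    intro p cur acc
    by_cases h1 : c = '('
    · by_cases hc : cur = [] <;> simp [parseAltGo, pvSm, h1, hc, ih]
    · by_cases h2 : c = ')'
      · by_cases hc : cur = [] <;> simp [parseAltGo, pvSm, h1, h2, hc, ih]
      · by_cases h3 : c = '|'
        · by_cases hc : cur = [] <;> simp [parseAltGo, pvSm, h1, h2, h3, hc, ih]
        · by_cases hp : p
          · simp [parseAltGo, pvSm, h1, h2, h3, hp, ih]
          · simp [parseAltGo, pvSm, h1, h2, h3, hp, ih]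

-- ===== VERDICT (by name: the statement is the Claim_ definition above) =====
theorem parse_spec : Claim_equal_parse := by
  intro line _
  unfold Spec_parse parse parse_alt
  rw [parseGo_eq_build, parseAltGo_eq_sm line.toList false [] []]
  rw [replace_single '(' '|', replace_single ')' '|', List.map_map, splitOn_bar]
  rw [show (fun (acc : List (List Char)) (x : List Char) =>
        if x ≠ [] then acc ++ [x] else acc)
      = (fun acc x => if (fun y : List Char => !y.isEmpty) x = true then acc ++ [id x] else acc)
    from by funext acc x; by_cases h : x = [] <;> simp [h]]
  rw [PySem.List.foldl_append_if, List.map_id]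
  simp only [List.nil_append]
  rw [show ((fun x => if x = ')' then '|' else x) ∘ fun x => if x = '(' then '|' else x) = pvSub
    from by funext x; by_cases h1 : x = '(' <;> by_cases h2 : x = ')' <;> simp_all [pvSub]]
  rw [split_build_eq_sm line.toList false [] (fun _ => rfl)]
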